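-- pv_equiv track=rewrite | github.com/YoshiHD4K/IngdeSoftware | ejercicioenclase/ejercicio6.py | tripletas_pitagoricas_primitivas
-- ===== SOURCE A (Python) =====
-- import math
--
-- def tripletas_pitagoricas_primitivas(N):
--     tripletas = []
--     for m in range(2, int(math.sqrt(N)) + 1):
--         for n in range (1, m):
--             if (m - n) % 2 == 1 and math.gcd(m, n) == 1:
--                 a = m**2 - n**2
--                 b = 2*m*n
--                 c = m**2 + n**2
--                 if c == N:
--                     tripletas.append((a, b, c))
--     return tripletas
-- ===== SOURCE B (Python) =====
-- import math
--
-- def tripletas_pitagoricas_primitivas(N):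
--     # O(sqrt N): for each m, recover n directly from n^2 = N - m^2 instead of scanning all n < m.
--     tripletas = []
--     for m in range(2, math.isqrt(N) + 1):
--         r = N - m * m
--         if r >= 1:
--             n = math.isqrt(r)
--             if n * n == r and n < m and (m - n) % 2 == 1 and math.gcd(m, n) == 1:
--                 tripletas.append((m * m - n * n, 2 * m * n, N))
--     return tripletas
-- ===== Notes on version B (the rewrite author's own statement) =====
-- stated objective: faster
-- what changed: Instead of scanning every n < m for each m, B recovers the unique candidate n directly as isqrt(N - m*m) and verifies perfect square, n < m, parity and gcd, eliminating the inner loop.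
import Mathlib
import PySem

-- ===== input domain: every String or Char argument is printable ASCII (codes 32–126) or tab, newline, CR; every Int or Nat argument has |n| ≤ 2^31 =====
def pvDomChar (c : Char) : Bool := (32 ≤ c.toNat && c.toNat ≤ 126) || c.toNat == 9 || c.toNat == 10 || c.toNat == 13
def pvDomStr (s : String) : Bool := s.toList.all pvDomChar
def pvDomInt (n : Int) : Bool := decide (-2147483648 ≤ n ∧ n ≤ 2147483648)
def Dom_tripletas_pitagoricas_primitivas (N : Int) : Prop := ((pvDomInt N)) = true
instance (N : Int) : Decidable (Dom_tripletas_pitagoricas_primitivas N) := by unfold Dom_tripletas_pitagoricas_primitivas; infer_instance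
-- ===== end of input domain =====

-- B replaces A's inner scan over all n < m by a direct integer-square-root recovery of n
-- from n^2 = N - m^2, turning O(N) into O(sqrt N) iterations (objective: faster, measured).

-- ===== PORT A =====
-- int(math.sqrt(N)) is the exact integer square root for 0 ≤ N ≤ 2^31 (double sqrt is
-- correctly rounded and N is far below 2^52), so it is ported as Nat.sqrt; exact on Dom ∩ Pre_.
def tripletas_pitagoricas_primitivas (N : Int) : List (List Int) :=
  (PySem.List.pyRange 2 ((Nat.sqrt N.toNat : Int) + 1) 1).foldl
    (fun acc m =>
      (PySem.List.pyRange 1 m 1).foldl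
        (fun acc n =>
          if PySem.Int.mod (m - n) 2 = 1 ∧ (Int.gcd m n : Int) = 1 then
            let a := m ^ 2 - n ^ 2
            let b := 2 * m * n
            let c := m ^ 2 + n ^ 2
            if c = N then acc ++ [[a, b, c]] else acc
          else acc)
        acc)
    []

-- ===== PORT B =====
-- math.isqrt → Nat.sqrt (exact)
def tripletas_pitagoricas_primitivas_alt (N : Int) : List (List Int) :=
  (PySem.List.pyRange 2 ((Nat.sqrt N.toNat : Int) + 1) 1).foldl
    (fun acc m =>
      let r := N - m * m
      if 1 ≤ r then
        let n : Int := (Nat.sqrt r.toNat : Int)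
        if n * n = r ∧ n < m ∧ PySem.Int.mod (m - n) 2 = 1 ∧ (Int.gcd m n : Int) = 1 then
          acc ++ [[m * m - n * n, 2 * m * n, N]]
        else acc
      else acc)
    []

-- ===== PRECONDITION & SPEC =====
-- Pre_ excludes only N < 0, where Python A raises ValueError (math.sqrt of a negative number).
def Pre_tripletas_pitagoricas_primitivas (N : Int) : Prop := 0 ≤ N
instance (N : Int) : Decidable (Pre_tripletas_pitagoricas_primitivas N) := by unfold Pre_tripletas_pitagoricas_primitivas; infer_instance
def pvWitness_tripletas_pitagoricas_primitivas : Int := (25)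

def Spec_tripletas_pitagoricas_primitivas (N : Int) (out : List (List Int)) : Prop := out = tripletas_pitagoricas_primitivas_alt N
instance (N : Int) (out : List (List Int)) : Decidable (Spec_tripletas_pitagoricas_primitivas N out) := by unfold Spec_tripletas_pitagoricas_primitivas; infer_instance

-- ===== CLAIM (what is proved, stated in full; the proofs are below) =====
def Claim_equal_tripletas_pitagoricas_primitivas : Prop := ∀ (N : Int), Dom_tripletas_pitagoricas_primitivas N → Pre_tripletas_pitagoricas_primitivas N → Spec_tripletas_pitagoricas_primitivas N (tripletas_pitagoricas_primitivas N)

-- ===== LEMMAS AND PROOFS =====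

-- A's inner-loop test on n, as one Bool predicate
def condA (N m n : Int) : Bool :=
  (PySem.Int.mod (m - n) 2 == 1) && (Int.gcd m n == 1) && (m ^ 2 + n ^ 2 == N)

-- A's per-m contribution
def fA (N m : Int) : List (List Int) :=
  ((PySem.List.pyRange 1 m 1).filter (condA N m)).map
    (fun n => [m ^ 2 - n ^ 2, 2 * m * n, m ^ 2 + n ^ 2])

-- B's per-m test and contribution
def condB (N m : Int) : Bool :=
  let r := N - m * m
  let n : Int := (Nat.sqrt r.toNat : Int)
  decide (1 ≤ r) && (n * n == r) && decide (n < m) &&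
    (PySem.Int.mod (m - n) 2 == 1) && (Int.gcd m n == 1)

def gB (N m : Int) : List (List Int) :=
  if condB N m then
    [[m * m - ((Nat.sqrt (N - m * m).toNat : Nat) : Int) * ((Nat.sqrt (N - m * m).toNat : Nat) : Int),
      2 * m * ((Nat.sqrt (N - m * m).toNat : Nat) : Int), N]]
  else []

lemma sqrt_of_sq (n r : Int) (hn : 0 ≤ n) (h : n * n = r) :
    ((Nat.sqrt r.toNat : Nat) : Int) = n := by
  have h1 : r = ((n.toNat * n.toNat : Nat) : Int) := by
    push_cast [Int.toNat_of_nonneg hn]; linarith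
  have h2 : r.toNat = n.toNat * n.toNat := by rw [h1]; exact Int.toNat_natCast _
  rw [h2, ← pow_two, Nat.sqrt_eq']
  exact Int.toNat_of_nonneg hn

-- any n ≥ 1 that A's test accepts is exactly B's candidate isqrt(N - m*m)
lemma condA_n_eq (N m n : Int) (hn : 1 ≤ n) (h : condA N m n = true) :
    n = ((Nat.sqrt (N - m * m).toNat : Nat) : Int) ∧ n * n = N - m * m := by
  simp only [condA, Bool.and_eq_true, beq_iff_eq] at h
  obtain ⟨⟨hmod, hgcd⟩, hc⟩ := h
  have hsq : n * n = N - m * m := by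
    rw [pow_two, pow_two] at hc; linarith
  exact ⟨(sqrt_of_sq n _ (by omega) hsq).symm, hsq⟩

lemma fA_eq_gB (N m : Int) : fA N m = gB N m := by
  by_cases hB : condB N m = true
  · have hB' := hB
    simp only [condB, Bool.and_eq_true, beq_iff_eq, decide_eq_true_eq] at hB'
    obtain ⟨⟨⟨⟨hr, hsq⟩, hnm⟩, hmod⟩, hgcd⟩ := hB'
    set n0 : Int := ((Nat.sqrt (N - m * m).toNat : Nat) : Int) with hn0def
    have hn0pos : 1 ≤ n0 := by
      have h1 : 0 < (N - m * m).toNat := by omega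
      have h2 := Nat.sqrt_pos.mpr h1
      omega
    have hcN : m ^ 2 + n0 ^ 2 = N := by rw [pow_two, pow_two]; linarith
    have hA0 : condA N m n0 = true := by
      simp only [condA, Bool.and_eq_true, beq_iff_eq]
      exact ⟨⟨hmod, hgcd⟩, hcN⟩
    have hsplit : PySem.List.pyRange 1 m 1
        = PySem.List.pyRange 1 n0 1 ++ PySem.List.pyRange n0 m 1 :=
      PySem.List.pyRange_one_append 1 n0 m hn0pos (le_of_lt hnm)
    have hcons : PySem.List.pyRange n0 m 1 = n0 :: PySem.List.pyRange (n0 + 1) m 1 :=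
      PySem.List.pyRange_one_cons hnm
    have hleft : (PySem.List.pyRange 1 n0 1).filter (condA N m) = [] := by
      rw [List.filter_eq_nil_iff]
      intro n hnmem
      rw [PySem.List.mem_pyRange_one] at hnmem
      intro hc
      have := (condA_n_eq N m n (by omega) hc).1
      omega
    have hright : (PySem.List.pyRange (n0 + 1) m 1).filter (condA N m) = [] := by
      rw [List.filter_eq_nil_iff]
      intro n hnmem
      rw [PySem.List.mem_pyRange_one] at hnmem
      intro hc
      have := (condA_n_eq N m n (by omega) hc).1
      omega
    unfold fA gB
    rw [hsplit, hcons, List.filter_append, hleft, List.filter_cons_of_pos hA0, hright]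
    simp only [List.nil_append, List.map_cons, List.map_nil]
    rw [if_pos hB]
    have e1 : m ^ 2 - n0 ^ 2 = m * m - n0 * n0 := by ring
    have e2 : m ^ 2 + n0 ^ 2 = N := hcN
    rw [e1, e2]
  · have hgB : gB N m = [] := by simp [gB, hB]
    have hfA : fA N m = [] := by
      unfold fA
      rw [List.filter_eq_nil_iff.mpr, List.map_nil]
      intro n hnmem
      rw [PySem.List.mem_pyRange_one] at hnmem
      intro hc
      obtain ⟨hn0, hsq⟩ := condA_n_eq N m n (by omega) hc
      apply hB
      simp only [condB, Bool.and_eq_true, beq_iff_eq, decide_eq_true_eq]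
      have hr1 : 1 ≤ N - m * m := by nlinarith [hnmem.1]
      refine ⟨⟨⟨⟨hr1, ?_⟩, ?_⟩, ?_⟩, ?_⟩
      · rw [← hn0]; exact hsq
      · rw [← hn0]; exact hnmem.2
      · rw [← hn0]
        simp only [condA, Bool.and_eq_true, beq_iff_eq] at hc
        exact hc.1.1
      · rw [← hn0]
        simp only [condA, Bool.and_eq_true, beq_iff_eq] at hc
        exact hc.1.2
    rw [hfA, hgB]

lemma innerA_eq (N m : Int) (acc : List (List Int)) :
    (PySem.List.pyRange 1 m 1).foldl
      (fun acc n =>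
        if PySem.Int.mod (m - n) 2 = 1 ∧ (Int.gcd m n : Int) = 1 then
          let a := m ^ 2 - n ^ 2
          let b := 2 * m * n
          let c := m ^ 2 + n ^ 2
          if c = N then acc ++ [[a, b, c]] else acc
        else acc)
      acc = acc ++ fA N m := by
  have h : (fun (acc : List (List Int)) (n : Int) =>
        if PySem.Int.mod (m - n) 2 = 1 ∧ (Int.gcd m n : Int) = 1 then
          let a := m ^ 2 - n ^ 2
          let b := 2 * m * n
          let c := m ^ 2 + n ^ 2
          if c = N then acc ++ [[a, b, c]] else acc
        else acc)
      = (fun acc n =>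
          if condA N m n then acc ++ [[m ^ 2 - n ^ 2, 2 * m * n, m ^ 2 + n ^ 2]] else acc) := by
    funext acc n
    simp only [condA, Bool.and_eq_true, beq_iff_eq]
    split_ifs with h1 h2 h3 h3 <;> first
      | rfl
      | (exfalso;
         simp only [Nat.cast_eq_one] at *
         tauto)
  rw [h]
  exact PySem.List.foldl_append_if _ _ _ _

lemma condB_iff (N m : Int) :
    condB N m = true ↔
      (1 ≤ N - m * m ∧
       (((Nat.sqrt (N - m * m).toNat : Nat) : Int) * ((Nat.sqrt (N - m * m).toNat : Nat) : Int) = N - m * m ∧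
        ((Nat.sqrt (N - m * m).toNat : Nat) : Int) < m ∧
        PySem.Int.mod (m - ((Nat.sqrt (N - m * m).toNat : Nat) : Int)) 2 = 1 ∧
        (Int.gcd m ((Nat.sqrt (N - m * m).toNat : Nat) : Int) : Int) = 1)) := by
  simp only [condB, Bool.and_eq_true, beq_iff_eq, decide_eq_true_eq, Nat.cast_eq_one]
  tauto

lemma innerB_eq (N m : Int) (acc : List (List Int)) :
    (let r := N - m * m
     if 1 ≤ r then
       let n : Int := (Nat.sqrt r.toNat : Int)
       if n * n = r ∧ n < m ∧ PySem.Int.mod (m - n) 2 = 1 ∧ (Int.gcd m n : Int) = 1 then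
         acc ++ [[m * m - n * n, 2 * m * n, N]]
       else acc
     else acc) = acc ++ gB N m := by
  show (if 1 ≤ N - m * m then
      if ((Nat.sqrt (N - m * m).toNat : Nat) : Int) * ((Nat.sqrt (N - m * m).toNat : Nat) : Int) = N - m * m ∧
          ((Nat.sqrt (N - m * m).toNat : Nat) : Int) < m ∧
          PySem.Int.mod (m - ((Nat.sqrt (N - m * m).toNat : Nat) : Int)) 2 = 1 ∧
          (Int.gcd m ((Nat.sqrt (N - m * m).toNat : Nat) : Int) : Int) = 1 then
        acc ++ [[m * m - ((Nat.sqrt (N - m * m).toNat : Nat) : Int) * ((Nat.sqrt (N - m * m).toNat : Nat) : Int),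
                 2 * m * ((Nat.sqrt (N - m * m).toNat : Nat) : Int), N]]
      else acc
    else acc) = acc ++ gB N m
  unfold gB
  by_cases h1 : 1 ≤ N - m * m
  · by_cases h2 : ((Nat.sqrt (N - m * m).toNat : Nat) : Int) * ((Nat.sqrt (N - m * m).toNat : Nat) : Int) = N - m * m ∧
        ((Nat.sqrt (N - m * m).toNat : Nat) : Int) < m ∧
        PySem.Int.mod (m - ((Nat.sqrt (N - m * m).toNat : Nat) : Int)) 2 = 1 ∧
        (Int.gcd m ((Nat.sqrt (N - m * m).toNat : Nat) : Int) : Int) = 1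
    · rw [if_pos h1, if_pos h2, if_pos ((condB_iff N m).mpr ⟨h1, h2⟩)]
    · rw [if_pos h1, if_neg h2, if_neg (fun hc => h2 ((condB_iff N m).mp hc).2), List.append_nil]
  · rw [if_neg h1, if_neg (fun hc => h1 ((condB_iff N m).mp hc).1), List.append_nil]

-- ===== VERDICT (by name: the statement is the Claim_ definition above) =====
theorem tripletas_pitagoricas_primitivas_spec : Claim_equal_tripletas_pitagoricas_primitivas := by
  intro N _ _
  unfold Spec_tripletas_pitagoricas_primitivas
  unfold tripletas_pitagoricas_primitivas tripletas_pitagoricas_primitivas_alt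
  have hA : (fun (acc : List (List Int)) (m : Int) =>
      (PySem.List.pyRange 1 m 1).foldl
        (fun acc n =>
          if PySem.Int.mod (m - n) 2 = 1 ∧ (Int.gcd m n : Int) = 1 then
            let a := m ^ 2 - n ^ 2
            let b := 2 * m * n
            let c := m ^ 2 + n ^ 2
            if c = N then acc ++ [[a, b, c]] else acc
          else acc)
        acc)
      = (fun acc m => acc ++ gB N m) := by
    funext acc m
    rw [innerA_eq, fA_eq_gB]
  have hB : (fun (acc : List (List Int)) (m : Int) =>
      let r := N - m * m
      if 1 ≤ r then
        let n : Int := (Nat.sqrt r.toNat : Int)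
        if n * n = r ∧ n < m ∧ PySem.Int.mod (m - n) 2 = 1 ∧ (Int.gcd m n : Int) = 1 then
          acc ++ [[m * m - n * n, 2 * m * n, N]]
        else acc
      else acc)
      = (fun acc m => acc ++ gB N m) := by
    funext acc m
    exact innerB_eq N m acc
  rw [hA, hB]
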